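-- pv_equiv track=rewrite | github.com/namansehwal/IITM-PYTHON-PROGRAMS | oppe/OPPE_1 Mock-3.py | matrix_type
-- ===== SOURCE A (Python) =====
-- def matrix_type(M):
--     flag = True
--     count=0
--     temp=M[0][0]
--     c=True
--     for i in range(len(M)):
--         for j in range(len(M[i])):
--             if i != j: #elements other than diagonal
--                 if M[i][j] != 0:
--                     flag = False
--                 else:
--                     flag = True
--             if flag:
--                 if i==j:
--                     if M[i][j]!=temp:
--                         c=False
--             else: #all elements
--                 return "non-diagonal"
--     if c==False:
--         return "diagonal"
--     else:
--         if temp==1: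
--             return "identity"
--         else:
--             return "scalar"
-- ===== SOURCE B (Python) =====
-- def matrix_type(M):
--     temp = M[0][0]
--     if any(x != 0
--            for i, row in enumerate(M)
--            for j, x in enumerate(row)
--            if i != j):
--         return "non-diagonal"
--     if any(row[i] != temp for i, row in enumerate(M) if i < len(row)):
--         return "diagonal"
--     return "identity" if temp == 1 else "scalar"
-- ===== Notes on version B (the rewrite author's own statement) =====
-- stated objective: simpler
-- what changed: A's single interleaved scan with a flag/c state machine and an in-loop early return is replaced by two separate single-purpose passes: one 'any' over the off-diagonal cells, then one 'any' over the diagonal entries (row[i] for rows with i < len(row)), followed by a direct identity/scalar decision.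
import Mathlib
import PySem

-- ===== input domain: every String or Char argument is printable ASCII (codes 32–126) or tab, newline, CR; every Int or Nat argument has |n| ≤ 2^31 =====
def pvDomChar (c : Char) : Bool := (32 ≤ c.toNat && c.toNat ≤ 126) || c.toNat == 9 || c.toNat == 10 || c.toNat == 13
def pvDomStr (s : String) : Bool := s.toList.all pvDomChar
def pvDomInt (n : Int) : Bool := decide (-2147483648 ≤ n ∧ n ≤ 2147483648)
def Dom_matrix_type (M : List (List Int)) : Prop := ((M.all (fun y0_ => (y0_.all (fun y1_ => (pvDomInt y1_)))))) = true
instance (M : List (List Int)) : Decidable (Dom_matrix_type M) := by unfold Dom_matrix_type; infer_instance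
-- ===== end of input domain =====

-- B is simpler: two separate single-purpose passes (off-diagonal scan, then diagonal scan) replace A's
-- interleaved flag/c state machine; equivalence of the RETURN value is proved on Pre_ (M[0][0] exists).

-- ===== PORT A =====
-- inner loop over the cells of row i (j = column counter), state (flag, c);
-- none models the early 'return "non-diagonal"'
def aRow (i : Nat) (temp : Int) : List Int → Nat → Bool → Bool → Option (Bool × Bool)
  | [], _, flag, c => some (flag, c)
  | x :: rest, j, flag, c =>
      let flag := if i ≠ j then (if x ≠ 0 then false else true) else flag
      if flag then
        aRow i temp rest (j + 1) flag
          (if i = j then (if x ≠ temp then false else c) else c)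
      else none

-- outer loop over rows (i = row counter)
def aRows (temp : Int) : List (List Int) → Nat → Bool → Bool → Option Bool
  | [], _, _, c => some c
  | row :: rest, i, flag, c =>
      match aRow i temp row 0 flag c with
      | none => none
      | some (flag, c) => aRows temp rest (i + 1) flag c

def matrix_type (M : List (List Int)) : String :=
  let temp := M.headI.headI      -- temp = M[0][0]; Pre_ guarantees both indexings succeed
  match aRows temp M 0 true true with
  | none => "non-diagonal"
  | some c => if c = false then "diagonal" else if temp = 1 then "identity" else "scalar"

-- ===== PORT B =====
def matrix_type_alt (M : List (List Int)) : String :=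
  let temp := M.headI.headI      -- temp = M[0][0]; Pre_ guarantees both indexings succeed
  if M.zipIdx.any (fun ri => ri.1.zipIdx.any (fun xj => decide (ri.2 ≠ xj.2) && decide (xj.1 ≠ 0))) then
    "non-diagonal"
  else if M.zipIdx.any (fun ri => decide (ri.2 < ri.1.length) && decide (ri.1.getD ri.2 0 ≠ temp)) then
    "diagonal"
  else if temp = 1 then "identity" else "scalar"

-- ===== PRECONDITION & SPEC =====
-- Pre_ excludes exactly the inputs where A raises IndexError on 'temp = M[0][0]' (B raises there too).
def Pre_matrix_type (M : List (List Int)) : Prop := M ≠ [] ∧ M.headI ≠ []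
instance (M : List (List Int)) : Decidable (Pre_matrix_type M) := by unfold Pre_matrix_type; infer_instance
def pvWitness_matrix_type : List (List Int) := [[1, 0], [0, 1]]
def Spec_matrix_type (M : List (List Int)) (out : String) : Prop := out = matrix_type_alt M
instance (M : List (List Int)) (out : String) : Decidable (Spec_matrix_type M out) := by unfold Spec_matrix_type; infer_instance

-- ===== CLAIM (what is proved, stated in full; the proofs are below) =====
def Claim_equal_matrix_type : Prop := ∀ (M : List (List Int)), Dom_matrix_type M → Pre_matrix_type M → Spec_matrix_type M (matrix_type M)

-- ===== LEMMAS AND PROOFS =====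

-- characterisation of A's inner loop when entered with flag = true
theorem aRow_char (i : Nat) (temp : Int) (row : List Int) (j : Nat) (c : Bool) :
    aRow i temp row j true c =
      if row.zipIdx j |>.any (fun xj => decide (i ≠ xj.2) && decide (xj.1 ≠ 0)) then none
      else some (true, c && !(row.zipIdx j |>.any (fun xj => decide (i = xj.2) && decide (xj.1 ≠ temp)))) := by
  induction row generalizing j c with
  | nil => simp [aRow]
  | cons x rest ih =>
    rw [List.zipIdx_cons, aRow]
    by_cases hij : i = j
    · subst hij
      rw [if_pos (by simp), if_pos rfl,
        show (if i ≠ i then (if x ≠ 0 then false else true) else true) = true from by simp, ih]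
      cases h2 : ((rest.zipIdx (i+1)).any (fun xj => decide (i ≠ xj.2) && decide (xj.1 ≠ 0))) <;>
        by_cases hx : x = temp <;>
          simp [hx, List.any_cons] <;> simpa using h2
    · by_cases hx : x = 0
      · have hf : (if i ≠ j then (if x ≠ 0 then false else true) else true) = true := by
          simp [hij, hx]
        have hd0 : decide (x ≠ (0:Int)) = false := by simp [hx]
        have hdij : decide (i = j) = false := by simp [hij]
        rw [if_pos hf, if_neg hij, hf, ih]
        simp only [List.any_cons, hd0, hdij, Bool.and_false, Bool.false_and, Bool.false_or]
      · rw [if_neg (by simp [hij, hx])]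
        simp [hij, hx, List.any_cons]

-- characterisation of A's outer loop when entered with flag = true
theorem aRows_char (temp : Int) (rows : List (List Int)) (i : Nat) (c : Bool) :
    aRows temp rows i true c =
      if rows.zipIdx i |>.any (fun ri => ri.1.zipIdx.any (fun xj => decide (ri.2 ≠ xj.2) && decide (xj.1 ≠ 0))) then none
      else some (c && !(rows.zipIdx i |>.any
        (fun ri => ri.1.zipIdx.any (fun xj => decide (ri.2 = xj.2) && decide (xj.1 ≠ temp))))) := by
  induction rows generalizing i c with
  | nil => simp [aRows]
  | cons row rest ih =>
    rw [aRows, aRow_char, List.zipIdx_cons]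
    cases h : (row.zipIdx 0 |>.any fun xj => decide (i ≠ xj.2) && decide (xj.1 ≠ 0)) with
    | true => simp only [List.any_cons, h, Bool.true_or, reduceIte]
    | false => simp only [Bool.false_eq_true, reduceIte, ih, List.any_cons, h, Bool.false_or,
        Bool.not_or, Bool.and_assoc]

-- per-row: A's diagonal-mismatch scan equals B's direct check
theorem diag_row_eq (i : Nat) (temp : Int) (row : List Int) :
    (row.zipIdx.any (fun xj => decide (i = xj.2) && decide (xj.1 ≠ temp)))
      = (decide (i < row.length) && decide (row.getD i 0 ≠ temp)) := by
  rcases h : decide (i < row.length) && decide (row.getD i 0 ≠ temp) with _ | _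
  · simp only [List.any_eq_false]
    rintro ⟨x, k⟩ hm
    rw [List.mem_zipIdx_iff_getElem?] at hm
    simp only [Bool.and_eq_true, decide_eq_true_eq, not_and]
    intro hik hxt
    subst hik
    obtain ⟨hk, hx⟩ := List.getElem?_eq_some_iff.mp hm
    simp only [Bool.and_eq_false_iff, decide_eq_false_iff_not, not_lt, Classical.not_not] at h
    rcases h with h | h
    · omega
    · rw [List.getD_eq_getElem?_getD, hm] at h
      exact hxt (by simpa [hx] using h)
  · simp only [Bool.and_eq_true, decide_eq_true_eq] at h
    obtain ⟨hk, hx⟩ := h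
    simp only [List.any_eq_true]
    refine ⟨(row[i], i), List.mem_zipIdx_iff_getElem?.mpr (by simp [List.getElem?_eq_getElem hk]), ?_⟩
    rw [List.getD_eq_getElem?_getD, List.getElem?_eq_getElem hk] at hx
    simpa using hx

-- ===== VERDICT (by name: the statement is the Claim_ definition above) =====
theorem matrix_type_spec : Claim_equal_matrix_type := by
  intro M _ _
  show matrix_type M = matrix_type_alt M
  simp only [matrix_type, matrix_type_alt]
  rw [aRows_char]
  have hd : (M.zipIdx 0 |>.any (fun ri => ri.1.zipIdx.any
        (fun xj => decide (ri.2 = xj.2) && decide (xj.1 ≠ M.headI.headI))))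
      = (M.zipIdx 0 |>.any (fun ri => decide (ri.2 < ri.1.length) && decide (ri.1.getD ri.2 0 ≠ M.headI.headI))) :=
    congrArg (List.any M.zipIdx) (funext fun ri => diag_row_eq ri.2 M.headI.headI ri.1)
  rw [hd]
  cases ha : (M.zipIdx 0 |>.any (fun ri => ri.1.zipIdx.any (fun xj => decide (ri.2 ≠ xj.2) && decide (xj.1 ≠ 0)))) with
  | true => simp
  | false =>
    simp only [Bool.false_eq_true, reduceIte, Bool.true_and]
    cases hb : (M.zipIdx 0 |>.any (fun ri => decide (ri.2 < ri.1.length) && decide (ri.1.getD ri.2 0 ≠ M.headI.headI))) <;>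
      simp
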